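-- pv_equiv track=rewrite | github.com/usc-isi-i2/etk | etk/spacy_extractors/customized_extractor.py | generate_shape
-- ===== SOURCE A (Python) =====
-- def generate_shape(word, count):
--     shape = ""
--     p = 0
--     for c in count:
--         if c > 4:
--             shape += word[p:p + 4]
--         else:
--             shape += word[p:p + c]
--         p = p + c
--
--     return shape
-- ===== SOURCE B (Python) =====
-- def generate_shape(word, count):
--     p = sum(count)
--     parts = []
--     for c in reversed(count):
--         p -= c
--         parts.append(word[p:p + min(c, 4)])
--     return "".join(reversed(parts))
-- ===== Notes on version B (the rewrite author's own statement) =====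
-- stated objective: alternative
-- what changed: Instead of a forward loop advancing a mutable pointer and appending to the shape, B computes the final pointer once as sum(count), traverses count in REVERSE recovering each segment start by subtraction, collects the slices, and assembles the output back-to-front with a reversed join.
import Mathlib
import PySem

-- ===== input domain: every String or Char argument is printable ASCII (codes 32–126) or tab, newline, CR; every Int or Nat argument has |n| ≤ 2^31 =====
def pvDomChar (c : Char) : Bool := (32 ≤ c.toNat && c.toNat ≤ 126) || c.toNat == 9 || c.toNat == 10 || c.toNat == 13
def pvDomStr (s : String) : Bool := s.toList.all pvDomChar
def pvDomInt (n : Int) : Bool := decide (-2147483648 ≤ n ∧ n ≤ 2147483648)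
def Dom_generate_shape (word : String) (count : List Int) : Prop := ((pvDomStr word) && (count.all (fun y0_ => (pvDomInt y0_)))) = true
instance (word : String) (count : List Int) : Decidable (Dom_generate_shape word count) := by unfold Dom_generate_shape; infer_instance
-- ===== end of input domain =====

-- B inverts the traversal: final pointer = sum(count), then walk count in reverse recovering each
-- segment start by subtraction and assemble the output back-to-front ('alternative', same cost).

-- ===== PORT A =====
-- A: running (shape, p) state; shape += word[p:p+4] or word[p:p+c]; p += c.
def generate_shape (word : String) (count : List Int) : String :=
  String.ofList
    ((count.foldl (fun (st : List Char × Int) c =>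
        if c > 4 then
          (st.1 ++ PySem.List.slice word.toList (some st.2) (some (st.2 + 4)), st.2 + c)
        else
          (st.1 ++ PySem.List.slice word.toList (some st.2) (some (st.2 + c)), st.2 + c)) ([], 0)).1)

-- ===== PORT B =====
-- B: p = sum(count); for c in reversed(count): p -= c; parts.append(word[p:p+min(c,4)]);
--    return "".join(reversed(parts)).
def generate_shape_alt (word : String) (count : List Int) : String :=
  let st := count.reverse.foldl (fun (st : Int × List (List Char)) c =>
      let p := st.1 - c
      (p, st.2 ++ [PySem.List.slice word.toList (some p) (some (p + min c 4))]))
    (count.foldl (· + ·) 0, [])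
  String.ofList (PySem.Chars.join [] st.2.reverse)

-- ===== PRECONDITION & SPEC =====
def Spec_generate_shape (word : String) (count : List Int) (out : String) : Prop := out = generate_shape_alt word count
instance (word : String) (count : List Int) (out : String) : Decidable (Spec_generate_shape word count out) := by unfold Spec_generate_shape; infer_instance

-- ===== CLAIM (what is proved, stated in full; the proofs are below) =====
def Claim_equal_generate_shape : Prop := ∀ (word : String) (count : List Int), Dom_generate_shape word count → Spec_generate_shape word count (generate_shape word count)

-- ===== LEMMAS AND PROOFS =====

-- forward segment concatenation (the common characterisation of both programs' output)
def pvSeg (w : List Char) : Int → List Int → List Char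
  | _, [] => []
  | p, c :: cs => PySem.List.slice w (some p) (some (p + min c 4)) ++ pvSeg w (p + c) cs

theorem pv_join_nil_flatten (l : List (List Char)) : PySem.Chars.join [] l = l.flatten := by
  induction l with
  | nil => simp [PySem.Chars.join, List.intercalate]
  | cons x xs ih =>
    cases xs with
    | nil => simp [PySem.Chars.join, List.intercalate]
    | cons y ys =>
      simp only [PySem.Chars.join, List.intercalate, List.intersperse] at *
      simp_all

-- A's loop, started at any (sh, p), produces sh followed by the forward segments from p.
theorem pv_loopA (w : List Char) (cs : List Int) : ∀ (sh : List Char) (p : Int),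
    (cs.foldl (fun (st : List Char × Int) c =>
        if c > 4 then
          (st.1 ++ PySem.List.slice w (some st.2) (some (st.2 + 4)), st.2 + c)
        else
          (st.1 ++ PySem.List.slice w (some st.2) (some (st.2 + c)), st.2 + c)) (sh, p)).1
      = sh ++ pvSeg w p cs := by
  induction cs with
  | nil => intro sh p; simp [pvSeg]
  | cons c cs ih =>
    intro sh p
    have hmin : p + min c 4 = if c > 4 then p + 4 else p + c := by
      split_ifs with h <;> omega
    simp only [List.foldl_cons, pvSeg, hmin]
    split_ifs with h <;> rw [ih] <;> simp

theorem pvSeg_append (w : List Char) (xs : List Int) (c : Int) : ∀ (p : Int),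
    pvSeg w p (xs ++ [c])
      = pvSeg w p xs ++ PySem.List.slice w (some (p + xs.sum)) (some (p + xs.sum + min c 4)) := by
  induction xs with
  | nil => intro p; simp [pvSeg]
  | cons x xs ih =>
    intro p
    simp only [List.cons_append, pvSeg, ih (p + x), List.sum_cons, List.append_assoc]
    ring_nf

-- B's reverse loop: the reversed, flattened parts are the forward segments of the reversed list.
theorem pv_loopB (w : List Char) (l : List Int) : ∀ (q : Int) (parts0 : List (List Char)),
    ((l.foldl (fun (st : Int × List (List Char)) c =>
        let p := st.1 - c
        (p, st.2 ++ [PySem.List.slice w (some p) (some (p + min c 4))])) (q, parts0)).2).reverse.flatten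
      = pvSeg w (q - l.sum) l.reverse ++ parts0.reverse.flatten := by
  induction l with
  | nil => intro q parts0; simp [pvSeg]
  | cons c cs ih =>
    intro q parts0
    simp only [List.foldl_cons, List.reverse_cons, List.sum_cons]
    rw [ih]
    rw [pvSeg_append w cs.reverse c (q - (c + cs.sum))]
    have h1 : q - (c + cs.sum) + cs.reverse.sum = q - c := by
      simp [List.sum_reverse]; ring
    rw [h1]
    have h2 : q - c - cs.sum = q - (c + cs.sum) := by ring
    rw [h2]
    simp

theorem pv_foldl_add_sum (l : List Int) : l.foldl (· + ·) 0 = l.sum := by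
  simp [List.sum_eq_foldl]

-- ===== VERDICT (by name: the statement is the Claim_ definition above) =====
theorem generate_shape_spec : Claim_equal_generate_shape := by
  intro word count _
  show generate_shape word count = generate_shape_alt word count
  unfold generate_shape generate_shape_alt
  rw [pv_loopA word.toList count [] 0]
  simp only [List.nil_append]
  rw [pv_join_nil_flatten, pv_foldl_add_sum, pv_loopB word.toList count.reverse count.sum []]
  simp [List.sum_reverse]
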